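-- pv_equiv track=rewrite | github.com/uk1107/uk1107 | 08-extra.py | calcpat
-- ===== SOURCE A (Python) =====
-- def calcpat(N,K):
--     dp = [[0 for i in range(N+1)] for i in range(N+1)]
--     for i in range(N+1):
--         for j in range(N+1):
--             if i == 0:
--                 dp[i][j] = 0
--             if j == 0 and i <= K:
--                 dp[i][j] = 1
--             elif i >= j and i - j <= K:
--                 dp[i][j] = dp[i-1][j] + dp[i][j-1]
--             else:
--                 dp[i][j] = 0
--     return dp[N][N]
-- ===== SOURCE B (Python) =====
-- def calcpat(N, K):
--     # 1-D walk over the diagonal strip: v[d] counts monotone prefixes whose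
--     # diagonal offset i-j equals d, evolved for 2*N steps, instead of A's 2-D table.
--     if K < 0:
--         return 0
--     m = K if K < N else N      # a path to (N,N) never reaches diagonal offset > N
--     width = m + 1
--     v = [0] * width
--     v[0] = 1
--     for _ in range(2 * N):
--         v = [(v[d - 1] if d > 0 else 0) + (v[d + 1] if d + 1 < width else 0)
--              for d in range(width)]
--     return v[0]
-- ===== Notes on version B (the rewrite author's own statement) =====
-- stated objective: alternative
-- what changed: Replaces A's (N+1)x(N+1) 2-D table indexed by (i,j) with a 1-D walk vector over the diagonal strip 0..min(K,N) evolved for 2*N steps (v[d] = paths whose current offset i-j is d), shrinking the state from O(N^2) to O(min(K,N)).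
import Mathlib
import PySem

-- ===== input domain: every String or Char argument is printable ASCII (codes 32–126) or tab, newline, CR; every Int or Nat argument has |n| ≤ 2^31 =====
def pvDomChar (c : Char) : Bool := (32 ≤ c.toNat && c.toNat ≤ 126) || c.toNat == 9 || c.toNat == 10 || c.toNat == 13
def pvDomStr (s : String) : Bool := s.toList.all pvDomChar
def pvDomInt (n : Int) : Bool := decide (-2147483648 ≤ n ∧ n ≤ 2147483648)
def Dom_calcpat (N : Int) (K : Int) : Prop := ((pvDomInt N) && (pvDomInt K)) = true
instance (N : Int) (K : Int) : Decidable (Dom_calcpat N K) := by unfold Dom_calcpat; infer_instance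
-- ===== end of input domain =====

-- B replaces A's 2-D (i,j) table with a 1-D vector over the diagonal strip evolved 2N steps
-- (alternative state/traversal, O(N*min(N,K)) space-and-work state instead of O(N^2) table).

-- ===== PORT A =====
-- Literal port of A. Python's first `if i == 0: dp[i][j] = 0` is a dead store (the following
-- if/elif/else always overwrites dp[i][j]), so the cell value is the second chain alone.
-- dp rows are built left-to-right exactly as Python overwrites them: `dp[i-1]` is the previous
-- finished row, `dp[i][j-1]` the cell written just before in the current row.
def calcpat (N : Int) (K : Int) : Int :=
  let idxs := PySem.List.pyRange 0 (N + 1) 1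
  let dp : List (List Int) :=
    idxs.foldl
      (fun dp i =>
        let row : List Int :=
          idxs.foldl
            (fun row j =>
              row ++ [ if j = 0 ∧ i ≤ K then (1 : Int)
                       else if i ≥ j ∧ i - j ≤ K then
                         PySem.List.pyGetD (PySem.List.pyGetD dp (i - 1) []) j 0
                           + PySem.List.pyGetD row (j - 1) 0
                       else 0 ])
            []
        dp ++ [row])
      []
  -- dp[N][N]; pyGet? = none (Python IndexError) iff N < 0, which Pre_calcpat excludes
  (PySem.List.pyGet? ((PySem.List.pyGet? dp N).getD []) N).getD 0

-- ===== PORT B =====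
def calcpat_alt (N : Int) (K : Int) : Int :=
  if K < 0 then 0
  else
    let m := if K < N then K else N
    let width := m + 1
    let v0 : List Int := (List.replicate width.toNat (0 : Int)).set 0 1
    let v :=
      (PySem.List.pyRange 0 (2 * N) 1).foldl
        (fun v _ =>
          (PySem.List.pyRange 0 width 1).map
            (fun d =>
              (if d > 0 then PySem.List.pyGetD v (d - 1) 0 else 0)
                + (if d + 1 < width then PySem.List.pyGetD v (d + 1) 0 else 0)))
        v0
    PySem.List.pyGetD v 0 0

-- ===== PRECONDITION & SPEC =====
-- Pre_ excludes exactly N < 0, where Python A raises IndexError (dp[N][N] on an empty table).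
def Pre_calcpat (N : Int) (K : Int) : Prop := 0 ≤ N
instance (N : Int) (K : Int) : Decidable (Pre_calcpat N K) := by unfold Pre_calcpat; infer_instance
def pvWitness_calcpat : Int × Int := (3, 1)

def Spec_calcpat (N : Int) (K : Int) (out : Int) : Prop := out = calcpat_alt N K
instance (N : Int) (K : Int) (out : Int) : Decidable (Spec_calcpat N K out) := by unfold Spec_calcpat; infer_instance

-- ===== CLAIM (what is proved, stated in full; the proofs are below) =====
def Claim_equal_calcpat : Prop := ∀ (N : Int) (K : Int), Dom_calcpat N K → Pre_calcpat N K → Spec_calcpat N K (calcpat N K)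

-- ===== LEMMAS AND PROOFS =====

-- The mathematical recurrence computed by A's table: Pf K i j = dp[i][j].
def Pf (K : Int) (i j : Nat) : Int :=
  if h0 : j = 0 ∧ (i : Int) ≤ K then 1
  else if h1 : j ≤ i ∧ (i : Int) - (j : Int) ≤ K then
    Pf K (i - 1) j + Pf K i (j - 1)
  else 0
termination_by i + j
decreasing_by
  · omega
  · omega

-- The walk counts computed by B's vector: Sf M t d = v[d] after t steps (strip 0..M).
def Sf (M : Int) : Nat → Nat → Int
  | 0, d => if d = 0 then 1 else 0
  | t + 1, d =>
      (if 0 < d then Sf M t (d - 1) else 0)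
        + (if (d : Int) + 1 < M + 1 then Sf M t (d + 1) else 0)

-- Sf is 0 beyond the number of steps taken
lemma Sf_gt (M : Int) (t d : Nat) (h : t < d) : Sf M t d = 0 := by
  induction t generalizing d with
  | zero => simp [Sf]; omega
  | succ t ih =>
    rw [Sf]
    rw [ih (d - 1) (by omega), ih (d + 1) (by omega)]
    simp

-- all-up walks: exactly one way, while the strip allows it
lemma Sf_diag (M : Int) (t : Nat) (h : (t : Int) ≤ M) : Sf M t t = 1 := by
  induction t with
  | zero => simp [Sf]
  | succ t ih =>
    rw [Sf, Sf_gt M t (t + 2) (by omega)]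
    simp only [Nat.add_sub_cancel]
    rw [ih (by omega)]
    split_ifs <;> omega

-- core correspondence: A's table entry (i,j) = B's walk count after i+j steps at offset i-j
lemma Pf_eq_Sf (K N M : Int) (hMK : M ≤ K) (hKN : K ≤ M ∨ N ≤ M)
    (i j : Nat) (hji : j ≤ i) (hd : (i : Int) - (j : Int) ≤ M) (hiN : (i : Int) ≤ N) :
    Pf K i j = Sf M (i + j) (i - j) := by
  rcases Nat.eq_zero_or_pos j with hj0 | hj1
  · subst hj0
    rw [Pf]
    rw [dif_pos ⟨rfl, by omega⟩]
    simp only [Nat.add_zero, Nat.sub_zero]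
    exact (Sf_diag M i (by omega)).symm
  · -- j ≥ 1, hence i ≥ 1
    have hi1 : 1 ≤ i := le_trans hj1 hji
    rw [Pf]
    rw [dif_neg (by omega)]
    rw [dif_pos ⟨hji, by omega⟩]
    have ht : i + j = (i + j - 1) + 1 := by omega
    rw [ht, Sf]
    congr 1
    · -- Pf K (i-1) j = first summand
      rcases Nat.eq_or_lt_of_le hji with heq | hlt
      · -- i = j: offset 0, both sides 0
        rw [if_neg (by omega)]
        rw [Pf, dif_neg (by omega), dif_neg (by omega)]
      · rw [if_pos (by omega)]
        rw [Pf_eq_Sf K N M hMK hKN (i - 1) j (by omega) (by omega) (by omega)]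
        congr 1 <;> omega
    · -- Pf K i (j-1) = second summand
      by_cases hlt : ((i - j : Nat) : Int) + 1 < M + 1
      · rw [if_pos (by push_cast [Nat.cast_sub hji] at hlt ⊢; omega)]
        rw [Pf_eq_Sf K N M hMK hKN i (j - 1) (by omega) (by push_cast [Nat.cast_sub hji] at hlt; omega) hiN]
        congr 1 <;> omega
      · rw [if_neg (by push_cast [Nat.cast_sub hji] at hlt ⊢; omega)]
        have hdM : (i : Int) - j = M := by
          push_cast [Nat.cast_sub hji] at hlt; omega
        rw [Pf]
        rw [dif_neg (by rcases hKN with h | h <;> omega)]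
        rw [dif_neg (by rcases hKN with h | h <;> omega)]
termination_by i + j
decreasing_by
  · omega
  · omega

-- row r of A's finished table
def rowv (K : Int) (n1 : Nat) (r : Nat) : List Int := (List.range n1).map (fun c => Pf K r c)

-- the inner j-loop of A builds exactly row i of the table
lemma calcpat_inner (K N : Int) (i : Int) (hi0 : 0 ≤ i) (hiN : i ≤ N) (jc : Nat)
    (hjc : jc ≤ (N + 1).toNat) :
    (PySem.List.pyRange 0 (jc : Int) 1).foldl
      (fun row j =>
        row ++ [ if j = 0 ∧ i ≤ K then (1 : Int)
                 else if i ≥ j ∧ i - j ≤ K then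
                   PySem.List.pyGetD
                       (PySem.List.pyGetD ((List.range i.toNat).map (rowv K (N + 1).toNat)) (i - 1) []) j 0
                     + PySem.List.pyGetD row (j - 1) 0
                 else 0 ]) []
    = (List.range jc).map (fun c => Pf K i.toNat c) := by
  induction jc with
  | zero => simp [PySem.List.pyRange_one_eq_nil]
  | succ jc ih =>
    have h1 : ((jc + 1 : Nat) : Int) = (jc : Int) + 1 := by push_cast; ring
    rw [h1, PySem.List.pyRange_one_succ_right (by positivity), List.foldl_append, ih (by omega)]
    rw [List.range_succ, List.map_append]
    simp only [List.foldl_cons, List.foldl_nil, List.map_cons, List.map_nil]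
    congr 1
    by_cases c1 : (jc : Int) = 0 ∧ i ≤ K
    · rw [if_pos c1, Pf, dif_pos ⟨by exact_mod_cast c1.1, by rw [Int.toNat_of_nonneg hi0]; exact c1.2⟩]
    · have c1' : ¬ (jc = 0 ∧ ((i.toNat : Nat) : Int) ≤ K) := by
        rw [Int.toNat_of_nonneg hi0]
        intro h; exact c1 ⟨by exact_mod_cast h.1, h.2⟩
      rw [if_neg c1]
      by_cases c2 : i ≥ (jc : Int) ∧ i - (jc : Int) ≤ K
      · have hjc1 : 1 ≤ jc := by
          rcases Nat.eq_zero_or_pos jc with h | h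
          · exact absurd ⟨by simp [h], by simpa [h] using c2.2⟩ c1
          · exact h
        have hi1 : 1 ≤ i := by omega
        rw [if_pos c2, Pf]
        rw [dif_neg (by push_cast [Int.toNat_of_nonneg hi0]; omega)]
        rw [dif_pos ⟨by omega, by push_cast [Int.toNat_of_nonneg hi0]; omega⟩]
        have hdp : PySem.List.pyGetD ((List.range i.toNat).map (rowv K (N + 1).toNat)) (i - 1) []
            = rowv K (N + 1).toNat (i.toNat - 1) := by
          rw [PySem.List.pyGetD_eq_getElem _ _ (by omega) (by simp only [List.length_map, List.length_range]; omega)]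
          simp only [List.getElem_map, List.getElem_range]
          congr 1
          omega
        have hX : PySem.List.pyGetD (rowv K (N + 1).toNat (i.toNat - 1)) ((jc : Nat) : Int) 0
            = Pf K (i.toNat - 1) jc := by
          rw [rowv, PySem.List.pyGetD_natCast, PySem.List.getD_map_range _ _ _ _ (by omega)]
        have hY : PySem.List.pyGetD ((List.range jc).map (fun c => Pf K i.toNat c)) ((jc : Int) - 1) 0
            = Pf K i.toNat (jc - 1) := by
          rw [show (jc : Int) - 1 = ((jc - 1 : Nat) : Int) from by omega]
          rw [PySem.List.pyGetD_natCast, PySem.List.getD_map_range _ _ _ _ (by omega)]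
        rw [hdp, hX, hY]
      · rw [if_neg c2, Pf, dif_neg c1']
        rw [dif_neg (by push_cast [Int.toNat_of_nonneg hi0]; omega)]

-- the outer i-loop of A builds the whole table row by row
lemma calcpat_outer (K N : Int) (hN : 0 ≤ N) (ic : Nat) (hic : ic ≤ (N + 1).toNat) :
    (PySem.List.pyRange 0 (ic : Int) 1).foldl
      (fun dp i =>
        dp ++ [ (PySem.List.pyRange 0 ((((N + 1).toNat) : Nat) : Int) 1).foldl
                  (fun row j =>
                    row ++ [ if j = 0 ∧ i ≤ K then (1 : Int)
                             else if i ≥ j ∧ i - j ≤ K then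
                               PySem.List.pyGetD (PySem.List.pyGetD dp (i - 1) []) j 0
                                 + PySem.List.pyGetD row (j - 1) 0
                             else 0 ]) [] ]) []
    = (List.range ic).map (rowv K (N + 1).toNat) := by
  induction ic with
  | zero => simp [PySem.List.pyRange_one_eq_nil]
  | succ ic ih =>
    have h1 : ((ic + 1 : Nat) : Int) = (ic : Int) + 1 := by push_cast; ring
    rw [h1, PySem.List.pyRange_one_succ_right (by positivity), List.foldl_append, ih (by omega)]
    rw [List.range_succ, List.map_append]
    simp only [List.foldl_cons, List.foldl_nil, List.map_cons, List.map_nil]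
    congr 1
    have := calcpat_inner K N (ic : Int) (by positivity) (by omega) (N + 1).toNat le_rfl
    simp only [Int.toNat_natCast] at this
    rw [this, rowv]

-- A computes the table recurrence at (N,N)
lemma calcpat_eq_Pf (N K : Int) (hN : 0 ≤ N) : calcpat N K = Pf K N.toNat N.toNat := by
  simp only [calcpat]
  rw [show (N + 1 : Int) = (((N + 1).toNat : Nat) : Int) from by omega]
  rw [calcpat_outer K N hN (N + 1).toNat le_rfl]
  rw [show (N : Int) = ((N.toNat : Nat) : Int) from by omega]
  simp only [PySem.List.pyGet?_natCast, Int.toNat_natCast, List.getElem?_map]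
  rw [List.getElem?_range (by omega)]
  simp only [Option.map_some, Option.getD_some, rowv, List.getElem?_map]
  rw [List.getElem?_range (by omega)]
  simp only [Option.map_some, Option.getD_some]

-- impossible strip: the table is identically 0
lemma Pf_neg (K : Int) (hK : K < 0) (i j : Nat) : Pf K i j = 0 := by
  rw [Pf, dif_neg (by omega), dif_neg (by omega)]

-- ===== B-side characterization =====
lemma foldl_const {α β : Type} (l : List β) (g : α → α) (init : α) :
    l.foldl (fun v _ => g v) init = g^[l.length] init := by
  induction l generalizing init with
  | nil => rfl
  | cons x xs ih => simp [List.foldl_cons, ih, Function.iterate_succ_apply]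

-- B's vector after t steps
def wvec (M : Int) (w : Nat) (t : Nat) : List Int := (List.range w).map (fun d => Sf M t d)

lemma init_wvec (M : Int) (hM : 0 ≤ M) :
    (List.replicate (M + 1).toNat (0 : Int)).set 0 1 = wvec M (M + 1).toNat 0 := by
  apply List.ext_getElem
  · simp [wvec]
  · intro k h1 h2
    simp only [List.getElem_set, List.getElem_replicate, wvec, List.getElem_map,
      List.getElem_range, Sf]
    split_ifs <;> omega

lemma step_wvec (M : Int) (hM : 0 ≤ M) (t : Nat) :
    (PySem.List.pyRange 0 (M + 1) 1).map
      (fun d =>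
        (if d > 0 then PySem.List.pyGetD (wvec M (M + 1).toNat t) (d - 1) 0 else 0)
          + (if d + 1 < M + 1 then PySem.List.pyGetD (wvec M (M + 1).toNat t) (d + 1) 0 else 0))
    = wvec M (M + 1).toNat (t + 1) := by
  have hw : (M + 1 : Int) = (((M + 1).toNat : Nat) : Int) := by omega
  rw [hw, PySem.List.pyRange_zero_natCast, List.map_map]
  simp only [wvec, Int.toNat_natCast]
  apply List.map_congr_left
  intro k hk
  rw [List.mem_range] at hk
  simp only [Function.comp_apply]
  have h1 : (if ((k : Nat) : Int) > 0 then PySem.List.pyGetD ((List.range (M + 1).toNat).map (fun d => Sf M t d)) (((k : Nat) : Int) - 1) 0 else 0)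
      = (if 0 < k then Sf M t (k - 1) else 0) := by
    by_cases hk0 : 0 < k
    · rw [if_pos (by exact_mod_cast hk0), if_pos hk0]
      rw [show ((k : Nat) : Int) - 1 = ((k - 1 : Nat) : Int) from by omega]
      rw [PySem.List.pyGetD_natCast, PySem.List.getD_map_range _ _ _ _ (by omega)]
    · rw [if_neg (by exact_mod_cast hk0), if_neg hk0]
  have h2 : (if ((k : Nat) : Int) + 1 < (((M + 1).toNat : Nat) : Int) then PySem.List.pyGetD ((List.range (M + 1).toNat).map (fun d => Sf M t d)) (((k : Nat) : Int) + 1) 0 else 0)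
      = (if ((k : Nat) : Int) + 1 < M + 1 then Sf M t (k + 1) else 0) := by
    by_cases hk1 : ((k : Nat) : Int) + 1 < M + 1
    · rw [if_pos (by omega), if_pos hk1]
      rw [show ((k : Nat) : Int) + 1 = ((k + 1 : Nat) : Int) from by push_cast; ring]
      rw [PySem.List.pyGetD_natCast, PySem.List.getD_map_range _ _ _ _ (by omega)]
    · rw [if_neg (by omega), if_neg hk1]
  rw [h1, h2, Sf]

-- B computes the walk counts after 2N steps at offset 0
lemma calcpat_alt_eq (N K : Int) (hN : 0 ≤ N) (hK : 0 ≤ K) :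
    calcpat_alt N K = Sf (if K < N then K else N) (2 * N).toNat 0 := by
  have hM0 : 0 ≤ (if K < N then K else N) := by split_ifs <;> omega
  simp only [calcpat_alt, if_neg (not_lt.mpr hK)]
  rw [foldl_const]
  rw [show (PySem.List.pyRange 0 (2 * N) 1).length = (2 * N).toNat from by
    rw [PySem.List.length_pyRange_one]; congr 1; ring]
  have hiter : ∀ t : Nat,
      (fun v =>
        (PySem.List.pyRange 0 ((if K < N then K else N) + 1) 1).map
          (fun d =>
            (if d > 0 then PySem.List.pyGetD v (d - 1) 0 else 0)
              + (if d + 1 < (if K < N then K else N) + 1 then PySem.List.pyGetD v (d + 1) 0 else 0)))^[t]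
        ((List.replicate ((if K < N then K else N) + 1).toNat (0 : Int)).set 0 1)
      = wvec (if K < N then K else N) ((if K < N then K else N) + 1).toNat t := by
    intro t
    induction t with
    | zero => simpa using init_wvec _ hM0
    | succ t ih => rw [Function.iterate_succ_apply', ih, step_wvec _ hM0]
  rw [hiter]
  rw [PySem.List.pyGetD_zero, wvec, PySem.List.getD_map_range _ _ _ _ (by omega)]

theorem calcpat_spec : Claim_equal_calcpat := by
  intro N K _ hPre
  show calcpat N K = calcpat_alt N K
  have hN : 0 ≤ N := hPre
  by_cases hK : K < 0
  · rw [calcpat_eq_Pf N K hN, Pf_neg K hK]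
    simp only [calcpat_alt, if_pos hK]
  · rw [not_lt] at hK
    rw [calcpat_eq_Pf N K hN, calcpat_alt_eq N K hN hK]
    have hM0 : 0 ≤ (if K < N then K else N) := by split_ifs <;> omega
    have hMK : (if K < N then K else N) ≤ K := by split_ifs <;> omega
    have hKN : K ≤ (if K < N then K else N) ∨ N ≤ (if K < N then K else N) := by
      split_ifs with h
      · exact Or.inl le_rfl
      · exact Or.inr le_rfl
    have h := Pf_eq_Sf K N (if K < N then K else N) hMK hKN N.toNat N.toNat le_rfl
      (by rw [sub_self]; exact hM0) (by omega)
    rw [h, show N.toNat + N.toNat = (2 * N).toNat from by omega, Nat.sub_self]
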